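-- pv_equiv track=rewrite | github.com/davidrscout/AutoApplierV2 | autoapplier/core/form_filler.py | _match_option
-- ===== SOURCE A (Python) =====
-- def _match_option(options: list[str], answer: str) -> str | None:
--     answer_l = answer.lower()
--     for opt in options:
--         if opt and answer_l == opt.lower():
--             return opt
--     for opt in options:
--         if opt and answer_l in opt.lower():
--             return opt
--     return None
-- ===== SOURCE B (Python) =====
-- def _match_option(options: list[str], answer: str) -> str | None:
--     answer_l = answer.lower()
--     fallback = None
--     for opt in options:
--         if not opt:
--             continue
--         low = opt.lower()
--         if low == answer_l:
--             return opt
--         if fallback is None and answer_l in low: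
--             fallback = opt
--     return fallback
-- ===== Notes on version B (the rewrite author's own statement) =====
-- stated objective: simpler
-- what changed: Single pass with a recorded substring fallback replaces A's two separate scans of the list, while exact matches still win immediately.
import Mathlib
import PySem

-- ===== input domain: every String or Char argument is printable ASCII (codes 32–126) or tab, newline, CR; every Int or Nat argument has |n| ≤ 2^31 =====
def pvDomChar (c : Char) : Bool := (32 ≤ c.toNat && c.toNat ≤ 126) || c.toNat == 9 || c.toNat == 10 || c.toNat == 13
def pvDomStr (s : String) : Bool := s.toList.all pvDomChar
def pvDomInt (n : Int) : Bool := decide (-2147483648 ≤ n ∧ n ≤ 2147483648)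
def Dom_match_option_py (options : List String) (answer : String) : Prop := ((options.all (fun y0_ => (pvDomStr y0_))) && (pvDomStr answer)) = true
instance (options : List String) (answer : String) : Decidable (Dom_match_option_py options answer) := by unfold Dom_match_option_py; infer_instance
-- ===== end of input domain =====

-- B replaces A's two scans (exact, then substring) by one pass that records the
-- first substring candidate as a fallback; equivalence proved for all inputs.

-- ===== PORT A =====
-- first loop: first non-empty opt with answer_l == opt.lower()
def matchLoopExact (aL : String) : List String → Option String
  | [] => none
  | o :: t => if o ≠ "" ∧ aL = PySem.Str.lower o then some o else matchLoopExact aL t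

-- second loop: first non-empty opt with answer_l in opt.lower()
def matchLoopSub (aL : String) : List String → Option String
  | [] => none
  | o :: t => if o ≠ "" ∧ PySem.Str.isIn aL (PySem.Str.lower o) = true then some o
              else matchLoopSub aL t

def match_option_py (options : List String) (answer : String) : Option String :=
  let aL := PySem.Str.lower answer
  match matchLoopExact aL options with
  | some o => some o
  | none => matchLoopSub aL options

-- ===== PORT B =====
-- one pass; fb holds the first substring candidate seen so far
def altGo (aL : String) : List String → Option String → Option String
  | [], fb => fb
  | o :: t, fb =>
    if o ≠ "" then
      if PySem.Str.lower o = aL then some o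
      else if fb = none ∧ PySem.Str.isIn aL (PySem.Str.lower o) = true then altGo aL t (some o)
      else altGo aL t fb
    else altGo aL t fb

def match_option_py_alt (options : List String) (answer : String) : Option String :=
  altGo (PySem.Str.lower answer) options none

-- ===== PRECONDITION & SPEC =====
def Spec_match_option_py (options : List String) (answer : String) (out : Option String) : Prop := out = match_option_py_alt options answer
instance (options : List String) (answer : String) (out : Option String) : Decidable (Spec_match_option_py options answer out) := by unfold Spec_match_option_py; infer_instance

-- ===== CLAIM (what is proved, stated in full; the proofs are below) =====
def Claim_equal_match_option_py : Prop := ∀ (options : List String) (answer : String), Dom_match_option_py options answer → Spec_match_option_py options answer (match_option_py options answer)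

-- ===== LEMMAS AND PROOFS =====

-- loop invariant: the one-pass fold with fallback fb equals "exact loop, else fb, else substring loop"
theorem altGo_eq (aL : String) (opts : List String) (fb : Option String) :
    altGo aL opts fb =
      match matchLoopExact aL opts with
      | some o => some o
      | none => match fb with
                | some f => some f
                | none => matchLoopSub aL opts := by
  induction opts generalizing fb with
  | nil => cases fb <;> simp [altGo, matchLoopExact, matchLoopSub]
  | cons o t ih =>
    by_cases ho : o = ""
    · subst ho
      simp only [altGo, matchLoopExact, matchLoopSub]
      simp [ih]
    · by_cases hx : PySem.Str.lower o = aL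
      · simp [altGo, matchLoopExact, ho, hx]
      · by_cases hs : PySem.Str.isIn aL (PySem.Str.lower o) = true
        · cases fb with
          | none =>
            simp only [altGo, matchLoopExact, matchLoopSub]
            have hx' : ¬ aL = PySem.Str.lower o := fun h => hx h.symm
            have hs' : PySem.Chars.isIn aL.toList (PySem.Chars.lower o.toList) = true := by
              simpa using hs
            simp [ho, hx, hx', hs', ih]
          | some f =>
            simp only [altGo, matchLoopExact]
            have hx' : ¬ aL = PySem.Str.lower o := fun h => hx h.symm
            simp [ho, hx, hx', ih]
        · cases fb with
          | none =>
            simp only [altGo, matchLoopExact, matchLoopSub]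
            have hx' : ¬ aL = PySem.Str.lower o := fun h => hx h.symm
            have hs' : ¬ PySem.Chars.isIn aL.toList (PySem.Chars.lower o.toList) = true := by
              simpa using hs
            simp [ho, hx, hx', hs', ih]
          | some f =>
            simp only [altGo, matchLoopExact]
            have hx' : ¬ aL = PySem.Str.lower o := fun h => hx h.symm
            simp [ho, hx, hx', ih]

-- ===== VERDICT (by name: the statement is the Claim_ definition above) =====
theorem match_option_py_spec : Claim_equal_match_option_py := by
  intro options answer _
  unfold Spec_match_option_py match_option_py match_option_py_alt
  rw [altGo_eq]
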